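-- pv_equiv track=rewrite | github.com/causerp/cangjie_stdx | cjpm_build.py | extract_target_value
-- ===== SOURCE A (Python) =====
-- def extract_target_value(args):
--     # Args is a list of strings
--     for i, arg in enumerate(args):
--         if arg == "--target":
--             if i + 1 < len(args):
--                 return args[i + 1]
--         elif arg.startswith("--target="):
--             return arg.split("=", 1)[1]
--     return None
-- ===== SOURCE B (Python) =====
-- def extract_target_value(args):
--     n = len(args)
--     try:
--         i = args.index("--target")
--     except ValueError:
--         i = n
--     j = next((k for k, a in enumerate(args) if a.startswith("--target=")), n)
--     if i < j and i + 1 < n: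
--         return args[i + 1]
--     if j < n:
--         return args[j].split("=", 1)[1]
--     return None
-- ===== Notes on version B (the rewrite author's own statement) =====
-- stated objective: alternative
-- what changed: Replaced the single scan with index lookahead by staged searches: find the first position of '--target' (list.index) and the first '--target='-prefixed position separately, then decide by comparing the two positions; correct because A returns for whichever of the two patterns occurs first (a trailing '--target' never fires).
import Mathlib
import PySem

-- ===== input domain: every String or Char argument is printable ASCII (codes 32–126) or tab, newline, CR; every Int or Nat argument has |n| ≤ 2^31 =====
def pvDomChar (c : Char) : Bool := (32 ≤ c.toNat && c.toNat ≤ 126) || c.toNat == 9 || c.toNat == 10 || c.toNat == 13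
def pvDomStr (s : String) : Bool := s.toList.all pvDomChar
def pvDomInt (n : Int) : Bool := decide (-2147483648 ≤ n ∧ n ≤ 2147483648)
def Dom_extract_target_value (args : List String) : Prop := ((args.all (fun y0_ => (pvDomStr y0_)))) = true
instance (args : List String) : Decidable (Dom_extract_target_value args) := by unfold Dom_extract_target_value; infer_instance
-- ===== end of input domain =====

-- B replaces A's single scan with lookahead by staged searches: locate the first
-- '--target' and the first '--target='-prefixed argument separately, then compare the
-- two positions; alternative decomposition, same cost.

-- ===== PORT A =====
-- for i, arg in enumerate(args): recursion over the remaining suffix carrying the index i; args stays whole for args[i+1].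
def extractGoA (args : List String) : Nat → List String → Option String
  | _, [] => none
  | i, arg :: rest =>
    if arg = "--target" then
      if ((i : Int) + 1) < (args.length : Int) then PySem.List.pyGet? args ((i : Int) + 1)
      else extractGoA args (i + 1) rest
    else if PySem.Str.startswith arg "--target=" then
      PySem.List.pyGet? ((PySem.Str.splitMax? arg "=" 1).getD []) 1
    else extractGoA args (i + 1) rest

def extract_target_value (args : List String) : Option String :=
  extractGoA args 0 args

-- ===== PORT B =====
-- i = args.index("--target") (n if ValueError); j = first index whose element starts
-- with "--target=" (n if none); then decide by comparing positions.
def extract_target_value_alt (args : List String) : Option String :=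
  let n := args.length
  let i := (PySem.List.index? args "--target").getD n
  let j := (args.findIdx? (fun a => PySem.Str.startswith a "--target=")).getD n
  if i < j ∧ i + 1 < n then PySem.List.pyGet? args ((i : Int) + 1)
  else if j < n then
    -- args[j].split("=", 1)[1]; j < n so the getD default is never used
    PySem.List.pyGet? ((PySem.Str.splitMax? (args.getD j "") "=" 1).getD []) 1
  else none

-- ===== PRECONDITION & SPEC =====
def Spec_extract_target_value (args : List String) (out : Option String) : Prop := out = extract_target_value_alt args
instance (args : List String) (out : Option String) : Decidable (Spec_extract_target_value args out) := by unfold Spec_extract_target_value; infer_instance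

-- ===== CLAIM (what is proved, stated in full; the proofs are below) =====
def Claim_equal_extract_target_value : Prop := ∀ (args : List String), Dom_extract_target_value args → Spec_extract_target_value args (extract_target_value args)

-- ===== LEMMAS AND PROOFS =====

-- proof-only intermediate form: A's scan as a plain structural recursion on the suffix
def extractGoB : List String → Option String
  | [] => none
  | arg :: rest =>
    if arg = "--target" then rest.head?
    else if PySem.Str.startswith arg "--target=" then
      PySem.List.pyGet? ((PySem.Str.splitMax? arg "=" 1).getD []) 1
    else extractGoB rest

theorem extractGoA_eq (cur : List String) : ∀ (pre : List String),
    extractGoA (pre ++ cur) pre.length cur = extractGoB cur := by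
  induction cur with
  | nil => intro pre; rfl
  | cons arg rest ih =>
    intro pre
    by_cases h1 : arg = "--target"
    · simp only [extractGoA, extractGoB, if_pos h1]
      cases rest with
      | nil => simp [extractGoA]
      | cons v vs =>
        have hlt : (((pre.length : Int) + 1) < (((pre ++ arg :: v :: vs).length : Nat) : Int)) := by
          simp only [List.length_append, List.length_cons]
          push_cast; omega
        rw [if_pos hlt, show ((pre.length : Int) + 1) = ((pre.length + 1 : Nat) : Int) by
          push_cast; ring, PySem.List.pyGet?_natCast]
        subst h1
        simp
    · simp only [extractGoA, extractGoB, if_neg h1]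
      split_ifs with h3
      · rfl
      · simpa using ih (pre ++ [arg])

theorem map_add_getD (o : Option Nat) (L : Nat) :
    ((o.map (· + 1)).getD (L + 1)) = o.getD L + 1 := by
  cases o <;> rfl

theorem target_not_starts : PySem.Str.startswith "--target" "--target=" = false := by decide

theorem alt_eq (l : List String) : extract_target_value_alt l =
    (if ((PySem.List.index? l "--target").getD l.length) <
          ((List.findIdx? (fun a => PySem.Str.startswith a "--target=") l).getD l.length) ∧
        ((PySem.List.index? l "--target").getD l.length) + 1 < l.length then
      PySem.List.pyGet? l (((PySem.List.index? l "--target").getD l.length : Int) + 1)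
    else if ((List.findIdx? (fun a => PySem.Str.startswith a "--target=") l).getD l.length) <
        l.length then
      PySem.List.pyGet? ((PySem.Str.splitMax?
        (l.getD ((List.findIdx? (fun a => PySem.Str.startswith a "--target=") l).getD l.length) "")
        "=" 1).getD []) 1
    else none) := rfl

theorem extractGoB_eq_alt : ∀ (l : List String), extractGoB l = extract_target_value_alt l := by
  intro l
  induction l with
  | nil => rfl
  | cons arg rest ih =>
    rw [alt_eq]
    by_cases h1 : arg = "--target"
    · subst h1
      rw [PySem.List.index?_cons_self]
      simp only [extractGoB, List.findIdx?_cons, target_not_starts,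
        Option.getD_some, List.length_cons]
      cases rest with
      | nil => simp [List.findIdx?]
      | cons v vs =>
        simp [PySem.List.pyGet?, PySem.List.pyIdx?]
    · rw [PySem.List.index?_cons_of_ne rest h1]
      by_cases h2 : PySem.Str.startswith arg "--target=" = true
      · have hj : List.findIdx? (fun a => PySem.Str.startswith a "--target=") (arg :: rest) =
            some 0 := by simp only [List.findIdx?_cons, h2]; rfl
        rw [hj]
        simp only [Option.getD_some, List.length_cons]
        rw [if_neg (by omega), if_pos (by omega)]
        simp only [extractGoB, if_neg h1, h2, if_true, List.getD_cons_zero]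
      · simp only [extractGoB, if_neg h1, ih, alt_eq, List.findIdx?_cons, h2,
          Bool.false_eq_true, if_false, List.length_cons, map_add_getD]
        set iR := (PySem.List.index? rest "--target").getD rest.length with hiR
        set jR := (List.findIdx? (fun a => PySem.Str.startswith a "--target=") rest).getD
          rest.length with hjR
        have hcond : (iR + 1 < jR + 1 ∧ iR + 1 + 1 < rest.length + 1) ↔
            (iR < jR ∧ iR + 1 < rest.length) := by omega
        by_cases hc : iR < jR ∧ iR + 1 < rest.length
        · rw [if_pos (hcond.mpr hc), if_pos hc]
          rw [show ((iR + 1 : Nat) : Int) + 1 = ((iR + 2 : Nat) : Int) by push_cast; ring,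
            show ((iR : Nat) : Int) + 1 = ((iR + 1 : Nat) : Int) by push_cast; ring,
            PySem.List.pyGet?_natCast, PySem.List.pyGet?_natCast]
          simp
        · rw [if_neg (fun h => hc (hcond.mp h)), if_neg hc]
          by_cases hj : jR < rest.length
          · rw [if_pos (by omega : jR + 1 < rest.length + 1), if_pos hj]
            simp
          · rw [if_neg (by omega : ¬ jR + 1 < rest.length + 1), if_neg hj]

-- ===== VERDICT (by name: the statement is the Claim_ definition above) =====
theorem extract_target_value_spec : Claim_equal_extract_target_value := by
  intro args _
  unfold Spec_extract_target_value extract_target_value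
  rw [← extractGoB_eq_alt]
  simpa using extractGoA_eq args []
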